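-- pv_equiv track=rewrite | github.com/Secrettestbot/Super-board-game-game | games/orc_lympics.py | find_straight
-- ===== SOURCE A (Python) =====
-- def find_straight(dice):
--     """Find longest consecutive run in dice. Returns highest value in longest straight."""
--     unique = sorted(set(dice))
--     if len(unique) < 2:
--         return 0
--     best_run = 1
--     current_run = 1
--     best_high = unique[0]
--     for i in range(1, len(unique)):
--         if unique[i] == unique[i - 1] + 1:
--             current_run += 1
--             if current_run >= best_run:
--                 best_run = current_run
--                 best_high = unique[i]
--         else:
--             current_run = 1
--     if best_run >= 3:
--         return best_high
--     elif best_run >= 2: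
--         return best_high  # partial straight still scores something
--     return 0
-- ===== SOURCE B (Python) =====
-- def find_straight(dice):
--     """Segment the sorted unique values into maximal runs, then pick the best run."""
--     unique = sorted(set(dice))
--     runs = []  # maximal runs in order, each as (length, end_value)
--     for v in unique:
--         if runs and v == runs[-1][1] + 1:
--             runs[-1] = (runs[-1][0] + 1, v)
--         else:
--             runs.append((1, v))
--     best = (0, 0)
--     for r in runs:
--         if r[0] > best[0] or (r[0] == best[0] and r[1] > best[1]):
--             best = r
--     return best[1] if best[0] >= 2 else 0
-- ===== Notes on version B (the rewrite author's own statement) =====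
-- stated objective: alternative
-- what changed: Replaces A's index-based scan carrying best_run/current_run/best_high with a two-phase decomposition: first segment the sorted unique values into maximal-run records (length, end), then a separate reduction selecting the lexicographically greatest run record and applying the length>=2 threshold.
import Mathlib
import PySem

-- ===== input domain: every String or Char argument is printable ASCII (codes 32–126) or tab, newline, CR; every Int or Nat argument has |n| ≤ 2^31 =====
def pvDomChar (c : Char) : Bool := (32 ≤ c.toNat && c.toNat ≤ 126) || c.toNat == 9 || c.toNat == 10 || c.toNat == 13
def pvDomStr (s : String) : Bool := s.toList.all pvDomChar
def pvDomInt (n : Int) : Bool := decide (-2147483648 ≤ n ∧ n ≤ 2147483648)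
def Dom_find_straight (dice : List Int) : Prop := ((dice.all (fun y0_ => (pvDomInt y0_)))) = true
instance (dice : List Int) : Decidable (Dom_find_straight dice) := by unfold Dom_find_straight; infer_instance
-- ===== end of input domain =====

-- B builds run records first and selects among them afterwards instead of A's single scan; alternative decomposition, same cost.

-- ===== PORT A =====
-- loop body of A's for-loop (st = (best_run, current_run, best_high), reading unique[i-1], unique[i])
def stepA (st : Int × Int × Int) (prev cur : Int) : Int × Int × Int :=
  if cur = prev + 1 then
    let c := st.2.1 + 1
    if c ≥ st.1 then (c, c, cur) else (st.1, c, st.2.2)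
  else (st.1, 1, st.2.2)

def find_straight (dice : List Int) : Int :=
  let unique := PySem.List.sorted (PySem.Set.ofList dice) (fun x => x) false
  if unique.length < 2 then 0
  else
    let st := (PySem.List.pyRange 1 (PySem.List.len unique) 1).foldl
      (fun st i => stepA st (PySem.List.pyGetD unique (i - 1) 0) (PySem.List.pyGetD unique i 0))
      (1, 1, PySem.List.pyGetD unique 0 0)
    if st.1 ≥ 3 then st.2.2 else if st.1 ≥ 2 then st.2.2 else 0

-- ===== PORT B =====
-- loop body of B's run-building loop; Python appends at the tail and mutates runs[-1],
-- so the fold keeps the run list REVERSED (head = runs[-1]) and reverses back afterwards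
def stepRuns (runs : List (Int × Int)) (v : Int) : List (Int × Int) :=
  match runs with
  | (l, e) :: rest => if v = e + 1 then (l + 1, v) :: rest else (1, v) :: (l, e) :: rest
  | [] => [(1, v)]

-- body of B's selection loop: keep the lexicographically larger (length, end) pair
def lmax (b r : Int × Int) : Int × Int :=
  if r.1 > b.1 ∨ (r.1 = b.1 ∧ r.2 > b.2) then r else b

def find_straight_alt (dice : List Int) : Int :=
  let unique := PySem.List.sorted (PySem.Set.ofList dice) (fun x => x) false
  let runs := (unique.foldl stepRuns []).reverse
  let best := runs.foldl lmax (0, 0)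
  if best.1 ≥ 2 then best.2 else 0

-- ===== PRECONDITION & SPEC =====
def Spec_find_straight (dice : List Int) (out : Int) : Prop := out = find_straight_alt dice
instance (dice : List Int) (out : Int) : Decidable (Spec_find_straight dice out) := by unfold Spec_find_straight; infer_instance

-- ===== CLAIM (what is proved, stated in full; the proofs are below) =====
def Claim_equal_find_straight : Prop := ∀ (dice : List Int), Dom_find_straight dice → Spec_find_straight dice (find_straight dice)

-- ===== LEMMAS AND PROOFS =====

lemma lmax_left_comm (a x y : Int × Int) : lmax (lmax a x) y = lmax (lmax a y) x := by
  obtain ⟨a1, a2⟩ := a; obtain ⟨x1, x2⟩ := x; obtain ⟨y1, y2⟩ := y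
  unfold lmax; dsimp only
  split_ifs <;> simp_all [Prod.mk.injEq] <;> omega

-- folding lmax lets the seed element move out
lemma foldl_lmax_swap (l : List (Int × Int)) : ∀ (a x : Int × Int),
    l.foldl lmax (lmax a x) = lmax (l.foldl lmax a) x := by
  induction l with
  | nil => intro a x; rfl
  | cons h t ih => intro a x; simp only [List.foldl_cons]; rw [lmax_left_comm, ih]

-- the selection loop's result does not depend on the traversal order of the runs
lemma foldl_lmax_reverse (l : List (Int × Int)) : ∀ (a : Int × Int),
    l.reverse.foldl lmax a = l.foldl lmax a := by
  induction l with
  | nil => intro a; rfl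
  | cons x t ih =>
      intro a
      simp only [List.reverse_cons, List.foldl_append, List.foldl_cons, List.foldl_nil, ih]
      rw [foldl_lmax_swap]

-- A's indexed fold over range(1, len u) reading u[i-1], u[i] is the fold over adjacent pairs.
lemma foldl_range_adjacent (u : List Int) (g : (Int × Int × Int) → Int → Int → (Int × Int × Int)) :
    ∀ (k a : Nat) (init : Int × Int × Int), u.length - a = k →
      (PySem.List.pyRange ((a : Int) + 1) (PySem.List.len u) 1).foldl
          (fun st i => g st (PySem.List.pyGetD u (i - 1) 0) (PySem.List.pyGetD u i 0)) init
        = ((u.drop a).zip (u.drop (a + 1))).foldl (fun st p => g st p.1 p.2) init := by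
  intro k
  induction k with
  | zero =>
      intro a init h
      rw [PySem.List.pyRange_one_eq_nil (by simp [PySem.List.len_eq]; omega)]
      rw [List.drop_eq_nil_of_le (show u.length ≤ a + 1 by omega)]
      simp
  | succ k ih =>
      intro a init h
      by_cases hlt : a + 1 < u.length
      · rw [PySem.List.pyRange_one_cons (by simp [PySem.List.len_eq]; omega)]
        have h2 : (a : Int) + 1 + 1 = ((a + 1 : Nat) : Int) + 1 := by push_cast; ring
        simp only [List.foldl_cons, h2]
        rw [ih (a + 1) _ (by omega)]
        rw [List.drop_eq_getElem_cons (by omega : a < u.length)]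
        rw [List.drop_eq_getElem_cons (by omega : a + 1 < u.length)]
        simp only [List.zip_cons_cons, List.foldl_cons]
        congr 2
        · rw [show ((a : Int) + 1) - 1 = ((a : Nat) : Int) by ring, PySem.List.pyGetD_natCast]
          exact List.getD_eq_getElem u 0 (by omega)
        · rw [show ((a : Int) + 1) = ((a + 1 : Nat) : Int) by push_cast; ring,
              PySem.List.pyGetD_natCast]
          exact List.getD_eq_getElem u 0 (by omega)
      · rw [PySem.List.pyRange_one_eq_nil (by simp [PySem.List.len_eq]; omega)]
        rw [List.drop_eq_nil_of_le (show u.length ≤ a + 1 by omega)]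
        simp

-- the joint loop invariant, stated as equality of the two final outputs
lemma main_inv (l : List Int) : ∀ (prev br cr bh : Int) (rest : List (Int × Int)),
    (prev :: l).Pairwise (· < ·) →
    1 ≤ cr → cr ≤ br →
    ((br = 1 ∧ (rest.foldl lmax (0, 0)).1 ≤ 1 ∧ cr = 1) ∨
      (2 ≤ br ∧ (br, bh) = lmax (rest.foldl lmax (0, 0)) (cr, prev))) →
    (rest.foldl lmax (0, 0)).1 ≤ br →
    ((rest.foldl lmax (0, 0)).1 = 0 ∨ (rest.foldl lmax (0, 0)).2 < prev) →
    (let A := ((prev :: l).zip l).foldl (fun st p => stepA st p.1 p.2) (br, cr, bh)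
     let M := (l.foldl stepRuns ((cr, prev) :: rest)).foldl lmax (0, 0)
     (if 2 ≤ A.1 then A.2.2 else 0) = (if 2 ≤ M.1 then M.2 else 0)) := by
  induction l with
  | nil =>
      intro prev br cr bh rest hpw hcr hbr hb hd he
      dsimp only
      simp only [List.zip_nil_right, List.foldl_nil, List.foldl_cons]
      rw [foldl_lmax_swap]
      cases hmm : rest.foldl lmax (0, 0) with
      | mk m1 m2 =>
        rw [hmm] at hb hd he
        rcases hb with ⟨hbr1, hm1, hcr1⟩ | ⟨hbr2, heq⟩
        · subst hbr1; subst hcr1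
          have hle : (lmax (m1, m2) (1, prev)).1 ≤ 1 := by
            unfold lmax; dsimp only; split_ifs <;> dsimp only <;> omega
          rw [if_neg (by omega), if_neg (by omega)]
        · rw [← heq]
  | cons v l' ih =>
      intro prev br cr bh rest hpw hcr hbr hb hd he
      have hpv : prev < v := (List.pairwise_cons.mp hpw).1 v (by simp)
      have hpw' : (v :: l').Pairwise (· < ·) := (List.pairwise_cons.mp hpw).2
      dsimp only
      simp only [List.zip_cons_cons, List.foldl_cons]
      cases hmm : rest.foldl lmax (0, 0) with
      | mk m1 m2 =>
        rw [hmm] at hb hd he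
        by_cases hc : v = prev + 1
        · have hA : stepA (br, cr, bh) prev v =
              (if cr + 1 ≥ br then (cr + 1, cr + 1, v) else (br, cr + 1, bh)) := by
            simp [stepA, hc]
          have hB : stepRuns ((cr, prev) :: rest) v = (cr + 1, v) :: rest := by
            simp [stepRuns, hc]
          rw [hA, hB]
          by_cases h2 : cr + 1 ≥ br
          · rw [if_pos h2]
            have := ih v (cr + 1) (cr + 1) v rest hpw' (by omega) (by omega)
              (Or.inr ⟨by omega, by
                rw [hmm]; unfold lmax; dsimp only
                rw [if_pos (by omega)]⟩)
              (by rw [hmm]; dsimp only; omega)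
              (by rw [hmm]; dsimp only; omega)
            dsimp only at this
            exact this
          · rw [if_neg h2]
            rcases hb with ⟨hbr1, _, hcr1⟩ | ⟨hbr2, heq⟩
            · omega
            · have hm12 : m1 = br ∧ m2 = bh := by
                unfold lmax at heq; dsimp only at heq
                rw [Prod.mk.injEq] at heq
                split_ifs at heq with hcond
                · omega
                · exact ⟨heq.1.symm, heq.2.symm⟩
              have := ih v br (cr + 1) bh rest hpw' (by omega) (by omega)
                (Or.inr ⟨by omega, by
                  rw [hmm]; unfold lmax; dsimp only
                  rw [if_neg (by omega)]
                  simp only [Prod.mk.injEq]; omega⟩)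
                (by rw [hmm]; dsimp only; omega)
                (by rw [hmm]; dsimp only; omega)
              dsimp only at this
              exact this
        · have hA : stepA (br, cr, bh) prev v = (br, 1, bh) := by
            simp [stepA, hc]
          have hB : stepRuns ((cr, prev) :: rest) v = (1, v) :: (cr, prev) :: rest := by
            simp [stepRuns, hc]
          rw [hA, hB]
          have hm' : ((cr, prev) :: rest).foldl lmax (0, 0) = lmax (m1, m2) (cr, prev) := by
            simp only [List.foldl_cons]; rw [foldl_lmax_swap, hmm]
          have := ih v br 1 bh ((cr, prev) :: rest) hpw' le_rfl (by omega)
            (by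
              rcases hb with ⟨hbr1, hm1, hcr1⟩ | ⟨hbr2, heq⟩
              · refine Or.inl ⟨hbr1, ?_, rfl⟩
                rw [hm']; unfold lmax; dsimp only
                split_ifs <;> (try dsimp only) <;> omega
              · refine Or.inr ⟨hbr2, ?_⟩
                rw [hm', ← heq]; unfold lmax; dsimp only
                rw [if_neg (by omega)])
            (by
              rw [hm']; unfold lmax; dsimp only
              split_ifs <;> (try dsimp only) <;> omega)
            (by
              rw [hm']; unfold lmax; dsimp only
              split_ifs with hco <;> (try dsimp only at hco ⊢) <;> omega)
          dsimp only at this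
          exact this

-- collapse A's two-step return into a single threshold test
lemma collapse_if (s : Int × Int × Int) :
    (if s.1 ≥ 3 then s.2.2 else if s.1 ≥ 2 then s.2.2 else 0) =
      (if 2 ≤ s.1 then s.2.2 else 0) := by
  split_ifs <;> first | rfl | omega

-- combine: the run-scan equals the run-record selection on any strictly increasing list
lemma core (u : List Int) (hpw : u.Pairwise (· < ·)) :
    (if u.length < 2 then (0 : Int)
     else
       let st := (PySem.List.pyRange 1 (PySem.List.len u) 1).foldl
         (fun st i => stepA st (PySem.List.pyGetD u (i - 1) 0) (PySem.List.pyGetD u i 0))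
         (1, 1, PySem.List.pyGetD u 0 0)
       if st.1 ≥ 3 then st.2.2 else if st.1 ≥ 2 then st.2.2 else 0)
    = (let runs := (u.foldl stepRuns []).reverse
       let best := runs.foldl lmax (0, 0)
       if best.1 ≥ 2 then best.2 else 0) := by
  match u with
  | [] => simp
  | [x] => norm_num [stepRuns, lmax]
  | x :: y :: t =>
      rw [if_neg (by simp)]
      dsimp only
      have hrange := foldl_range_adjacent (x :: y :: t) stepA (x :: y :: t).length 0
        (1, 1, PySem.List.pyGetD (x :: y :: t) 0 0) (by simp)
      rw [show (((0 : Nat) : Int) + 1) = 1 by norm_num] at hrange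
      rw [hrange]
      have hd0 : List.drop 0 (x :: y :: t) = x :: y :: t := rfl
      have hd1 : List.drop (0 + 1) (x :: y :: t) = y :: t := rfl
      rw [hd0, hd1]
      have hg0 : PySem.List.pyGetD (x :: y :: t) 0 0 = x := by
        rw [show (0 : Int) = ((0 : Nat) : Int) by norm_num, PySem.List.pyGetD_natCast]; rfl
      rw [hg0]
      rw [foldl_lmax_reverse]
      have hBside : (x :: y :: t).foldl stepRuns [] = (y :: t).foldl stepRuns [(1, x)] := rfl
      rw [hBside]
      have := main_inv (y :: t) x 1 1 x [] hpw le_rfl le_rfl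
        (Or.inl ⟨rfl, by norm_num, rfl⟩) (by norm_num) (Or.inl rfl)
      dsimp only at this
      rw [collapse_if]
      exact this

-- ===== VERDICT (by name: the statement is the Claim_ definition above) =====
theorem find_straight_spec : Claim_equal_find_straight := by
  intro dice _
  unfold Spec_find_straight find_straight find_straight_alt
  exact core _ (PySem.List.sorted_ofList_pairwise_lt (xs := dice))
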